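-- pv_equiv track=rewrite | github.com/CarpMarcel02/Python | Exercitiu3.py | functi_multiple
-- ===== SOURCE A (Python) =====
-- def functi_multiple(a, b):
--     a_minus_b = list()
--     b_minus_a = list()
--     a_intersectat_b = list()
--     a_reunit_b = set()
--     for i in a:
--         gasit = 0
--         for j in b:
--             if i == j:
--                 gasit = 1
--         if gasit == 0:
--             a_minus_b.append(i)
--
--     for i in b:
--         gasit = 0
--         for j in a:
--             if i == j:
--                 gasit = 1
--         if gasit == 0:
--             b_minus_a.append(i)
--
--     for i in a:
--         gasit = 0
--         for j in b:
--             if i == j: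
--                 gasit = 1
--         if gasit == 1:
--             a_intersectat_b.append(i)
--
--     for i in a:
--         a_reunit_b.add(i)
--     for j in b:
--         a_reunit_b.add(j)
--
--     return a_minus_b, b_minus_a, a_intersectat_b, a_reunit_b
-- ===== SOURCE B (Python) =====
-- def functi_multiple(a, b):
--     # sort-merge: the shared values are found by a two-pointer sweep of the
--     # sorted deduplicated lists, then one filter pass builds each output.
--     sa = sorted(set(a))
--     sb = sorted(set(b))
--     common = []
--     i = 0
--     j = 0
--     while i < len(sa) and j < len(sb):
--         if sa[i] < sb[j]:
--             i += 1
--         elif sb[j] < sa[i]: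
--             j += 1
--         else:
--             common.append(sa[i])
--             i += 1
--             j += 1
--     cs = set(common)
--     a_minus_b = [x for x in a if x not in cs]
--     b_minus_a = [x for x in b if x not in cs]
--     a_intersectat_b = [x for x in a if x in cs]
--     a_reunit_b = set(a) | set(b)
--     return a_minus_b, b_minus_a, a_intersectat_b, a_reunit_b
-- ===== Notes on version B (the rewrite author's own statement) =====
-- stated objective: faster
-- what changed: Replaces A's four nested membership scans with a sort-merge algorithm: sort the deduplicated lists once and find the shared values by a single two-pointer sweep, then one filter pass per output list uses that common set; correctness holds because for x in a (resp. b), x is in the common set iff x is in both lists.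
import Mathlib
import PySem

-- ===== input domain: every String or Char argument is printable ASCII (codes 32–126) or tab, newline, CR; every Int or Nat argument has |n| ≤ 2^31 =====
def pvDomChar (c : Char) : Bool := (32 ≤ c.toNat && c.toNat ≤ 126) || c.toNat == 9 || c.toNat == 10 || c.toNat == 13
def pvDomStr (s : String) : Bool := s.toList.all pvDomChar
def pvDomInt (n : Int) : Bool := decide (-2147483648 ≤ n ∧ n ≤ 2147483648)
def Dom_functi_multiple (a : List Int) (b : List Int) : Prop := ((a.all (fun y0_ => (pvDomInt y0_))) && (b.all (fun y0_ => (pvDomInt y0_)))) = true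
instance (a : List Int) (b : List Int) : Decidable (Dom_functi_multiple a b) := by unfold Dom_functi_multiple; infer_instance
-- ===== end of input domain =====

-- B replaces A's quadratic nested membership scans by a sort-merge: sorted deduplicated
-- lists swept by two pointers yield the common values, then one filter pass per output (faster).

-- ===== PORT A =====
def functi_multiple (a : List Int) (b : List Int) : List Int × List Int × List Int × List Int :=
  let a_minus_b : List Int :=
    a.foldl (fun acc i =>
      let gasit : Int := b.foldl (fun g j => if i = j then 1 else g) 0
      if gasit = 0 then acc ++ [i] else acc) []
  let b_minus_a : List Int :=
    b.foldl (fun acc i =>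
      let gasit : Int := a.foldl (fun g j => if i = j then 1 else g) 0
      if gasit = 0 then acc ++ [i] else acc) []
  let a_intersectat_b : List Int :=
    a.foldl (fun acc i =>
      let gasit : Int := b.foldl (fun g j => if i = j then 1 else g) 0
      if gasit = 1 then acc ++ [i] else acc) []
  let a_reunit_b : PySem.Set Int :=
    b.foldl PySem.Set.add (a.foldl PySem.Set.add PySem.Set.empty)
  (a_minus_b, b_minus_a, a_intersectat_b, a_reunit_b)

-- ===== PORT B =====
-- the Python while-loop over indices i, j (two-pointer sweep collecting equal values);
-- the fuel argument only makes the recursion structural: sa.length + sb.length steps always suffice.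
def commonLoop (sa sb : List Int) : Nat → Nat → Nat → List Int → List Int
  | 0, _, _, acc => acc
  | fuel + 1, i, j, acc =>
    if h : i < sa.length ∧ j < sb.length then
      if sa[i]'h.1 < sb[j]'h.2 then commonLoop sa sb fuel (i+1) j acc
      else if sb[j]'h.2 < sa[i]'h.1 then commonLoop sa sb fuel i (j+1) acc
      else commonLoop sa sb fuel (i+1) (j+1) (acc ++ [sa[i]'h.1])
    else acc

def functi_multiple_alt (a : List Int) (b : List Int) : List Int × List Int × List Int × List Int :=
  let sa : List Int := PySem.List.sorted (PySem.Set.ofList a) (fun x => x) false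
  let sb : List Int := PySem.List.sorted (PySem.Set.ofList b) (fun x => x) false
  let common : List Int := commonLoop sa sb (sa.length + sb.length) 0 0 []
  let cs : PySem.Set Int := PySem.Set.ofList common
  let a_minus_b : List Int := a.filter (fun x => !(PySem.Set.contains cs x))
  let b_minus_a : List Int := b.filter (fun x => !(PySem.Set.contains cs x))
  let a_intersectat_b : List Int := a.filter (fun x => PySem.Set.contains cs x)
  let a_reunit_b : PySem.Set Int := PySem.Set.union (PySem.Set.ofList a) (PySem.Set.ofList b)
  (a_minus_b, b_minus_a, a_intersectat_b, a_reunit_b)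

-- ===== PRECONDITION & SPEC =====
def Spec_functi_multiple (a : List Int) (b : List Int) (out : List Int × List Int × List Int × List Int) : Prop := out = functi_multiple_alt a b
instance (a : List Int) (b : List Int) (out : List Int × List Int × List Int × List Int) : Decidable (Spec_functi_multiple a b out) := by unfold Spec_functi_multiple; infer_instance

-- ===== CLAIM =====
def Claim_equal_functi_multiple : Prop := ∀ (a : List Int) (b : List Int), Dom_functi_multiple a b → Spec_functi_multiple a b (functi_multiple a b)

-- ===== LEMMAS AND PROOFS =====

-- A's inner 'gasit' loop computes membership.
theorem gasit_eq (i : Int) (b : List Int) (g0 : Int) :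
    b.foldl (fun g j => if i = j then 1 else g) g0 = if i ∈ b then 1 else g0 := by
  induction b generalizing g0 with
  | nil => simp
  | cons j b ih =>
    simp only [List.foldl_cons, ih, List.mem_cons]
    by_cases hij : i = j <;> by_cases hib : i ∈ b <;> simp [hij, hib]

-- A's 'append when gasit == 0' loop is a filter by non-membership.
theorem minus_loop_eq (u v : List Int) (acc : List Int) :
    u.foldl (fun acc i =>
        if (v.foldl (fun g j => if i = j then 1 else g) (0 : Int)) = 0 then acc ++ [i] else acc) acc
      = acc ++ u.filter (fun i => !decide (i ∈ v)) := by
  induction u generalizing acc with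
  | nil => simp
  | cons x u ih =>
    rw [List.foldl_cons, gasit_eq, ih]
    by_cases h : x ∈ v <;> simp [h]

-- A's 'append when gasit == 1' loop is a filter by membership.
theorem inter_loop_eq (u v : List Int) (acc : List Int) :
    u.foldl (fun acc i =>
        if (v.foldl (fun g j => if i = j then 1 else g) (0 : Int)) = 1 then acc ++ [i] else acc) acc
      = acc ++ u.filter (fun i => decide (i ∈ v)) := by
  induction u generalizing acc with
  | nil => simp
  | cons x u ih =>
    rw [List.foldl_cons, gasit_eq, ih]
    by_cases h : x ∈ v <;> simp [h]

-- folding Set.add over (xs.foldl add acc) is folding it over xs after acc.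
theorem foldl_add_foldl_add (xs : List Int) (acc s : PySem.Set Int) :
    (xs.foldl PySem.Set.add acc).foldl PySem.Set.add s
      = xs.foldl PySem.Set.add (acc.foldl PySem.Set.add s) := by
  induction xs generalizing acc with
  | nil => rfl
  | cons x xs ih =>
    simp only [List.foldl_cons, ih]
    congr 1
    by_cases hx : x ∈ acc
    · rw [PySem.Set.add_of_mem hx, PySem.Set.add_of_mem]
      exact (PySem.Set.mem_update s acc x).2 (Or.inr hx)
    · rw [PySem.Set.add_of_not_mem hx, List.foldl_append]
      rfl

-- in a strictly increasing list, every element of drop (i+1) is > the element at i.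
theorem lt_of_mem_drop_succ (l : List Int) (hp : l.Pairwise (· < ·)) (i : Nat) (hi : i < l.length)
    (x : Int) (hx : x ∈ l.drop (i+1)) : l[i] < x := by
  have hp' : (l.drop i).Pairwise (· < ·) := hp.sublist (List.drop_sublist i l)
  rw [List.drop_eq_getElem_cons hi] at hp'
  exact (List.pairwise_cons.1 hp').1 x hx

-- every element of drop i is ≥ the element at i.
theorem le_of_mem_drop (l : List Int) (hp : l.Pairwise (· < ·)) (i : Nat) (hi : i < l.length)
    (x : Int) (hx : x ∈ l.drop i) : l[i] ≤ x := by
  rw [List.drop_eq_getElem_cons hi] at hx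
  rcases List.mem_cons.1 hx with hx | hx
  · exact le_of_eq hx.symm
  · exact le_of_lt (lt_of_mem_drop_succ l hp i hi x hx)

-- membership characterisation of the two-pointer sweep on strictly increasing lists.
theorem commonLoop_mem (sa sb : List Int) (ha : sa.Pairwise (· < ·)) (hb : sb.Pairwise (· < ·))
    (fuel i j : Nat) (hfuel : sa.length - i + (sb.length - j) ≤ fuel)
    (acc : List Int) (x : Int) :
    x ∈ commonLoop sa sb fuel i j acc ↔ x ∈ acc ∨ (x ∈ sa.drop i ∧ x ∈ sb.drop j) := by
  induction fuel generalizing i j acc with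
  | zero =>
    have hi : sa.length ≤ i := by omega
    rw [commonLoop, List.drop_eq_nil_of_le hi]
    simp
  | succ fuel ih =>
    rw [commonLoop]
    split_ifs with h hlt hlt2
    · obtain ⟨hi, hj⟩ := h
      rw [ih (i+1) j (by omega) acc]
      constructor
      · rintro (hacc | ⟨h1, h2⟩)
        · exact Or.inl hacc
        · exact Or.inr ⟨(List.drop_sublist_drop_left sa (Nat.le_succ i)).mem h1, h2⟩
      · rintro (hacc | ⟨h1, h2⟩)
        · exact Or.inl hacc
        · rw [List.drop_eq_getElem_cons hi] at h1
          rcases List.mem_cons.1 h1 with h1 | h1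
          · have h3 := le_of_mem_drop sb hb j hj x h2
            omega
          · exact Or.inr ⟨h1, h2⟩
    · obtain ⟨hi, hj⟩ := h
      rw [ih i (j+1) (by omega) acc]
      constructor
      · rintro (hacc | ⟨h1, h2⟩)
        · exact Or.inl hacc
        · exact Or.inr ⟨h1, (List.drop_sublist_drop_left sb (Nat.le_succ j)).mem h2⟩
      · rintro (hacc | ⟨h1, h2⟩)
        · exact Or.inl hacc
        · rw [List.drop_eq_getElem_cons hj] at h2
          rcases List.mem_cons.1 h2 with h2 | h2
          · have h3 := le_of_mem_drop sa ha i hi x h1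
            omega
          · exact Or.inr ⟨h1, h2⟩
    · obtain ⟨hi, hj⟩ := h
      rw [ih (i+1) (j+1) (by omega) (acc ++ [sa[i]])]
      have heq : sa[i] = sb[j] := by omega
      rw [List.drop_eq_getElem_cons hi, List.drop_eq_getElem_cons hj]
      constructor
      · rintro (hacc | ⟨h1, h2⟩)
        · rcases List.mem_append.1 hacc with hacc | hx
          · exact Or.inl hacc
          · rcases List.mem_cons.1 hx with hx | hx
            · exact Or.inr ⟨List.mem_cons.2 (Or.inl hx),
                List.mem_cons.2 (Or.inl (hx.trans heq))⟩
            · exact absurd hx (List.not_mem_nil)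
        · exact Or.inr ⟨List.mem_cons.2 (Or.inr h1), List.mem_cons.2 (Or.inr h2)⟩
      · rintro (hacc | ⟨h1, h2⟩)
        · exact Or.inl (List.mem_append.2 (Or.inl hacc))
        · rcases List.mem_cons.1 h1 with h1 | h1
          · exact Or.inl (List.mem_append.2 (Or.inr (List.mem_cons.2 (Or.inl h1))))
          · rcases List.mem_cons.1 h2 with h2 | h2
            · exfalso
              have := lt_of_mem_drop_succ sa ha i hi x h1
              omega
            · exact Or.inr ⟨h1, h2⟩
    · constructor
      · exact Or.inl
      · rintro (hacc | ⟨h1, h2⟩)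
        · exact hacc
        · exfalso
          rcases Nat.lt_or_ge i sa.length with hi | hi
          · have hj : sb.length ≤ j := by omega
            rw [List.drop_eq_nil_of_le hj] at h2
            exact absurd h2 (List.not_mem_nil)
          · rw [List.drop_eq_nil_of_le hi] at h1
            exact absurd h1 (List.not_mem_nil)

-- membership in the common set computed by the sweep is joint membership.
theorem contains_common (a b : List Int) (x : Int) :
    PySem.Set.contains (PySem.Set.ofList (commonLoop
      (PySem.List.sorted (PySem.Set.ofList a) (fun x => x) false)
      (PySem.List.sorted (PySem.Set.ofList b) (fun x => x) false)
      ((PySem.List.sorted (PySem.Set.ofList a) (fun x => x) false).length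
        + (PySem.List.sorted (PySem.Set.ofList b) (fun x => x) false).length) 0 0 [])) x
      = (decide (x ∈ a) && decide (x ∈ b)) := by
  have ha := PySem.List.sorted_ofList_pairwise_lt (xs := a)
  have hb := PySem.List.sorted_ofList_pairwise_lt (xs := b)
  have h := commonLoop_mem
    (PySem.List.sorted (PySem.Set.ofList a) (fun x => x) false)
    (PySem.List.sorted (PySem.Set.ofList b) (fun x => x) false) ha hb
    ((PySem.List.sorted (PySem.Set.ofList a) (fun x => x) false).length
      + (PySem.List.sorted (PySem.Set.ofList b) (fun x => x) false).length)
    0 0 (by omega) [] x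
  simp only [List.drop_zero, List.not_mem_nil, false_or] at h
  have hiff : PySem.Set.contains (PySem.Set.ofList (commonLoop
      (PySem.List.sorted (PySem.Set.ofList a) (fun x => x) false)
      (PySem.List.sorted (PySem.Set.ofList b) (fun x => x) false)
      ((PySem.List.sorted (PySem.Set.ofList a) (fun x => x) false).length
        + (PySem.List.sorted (PySem.Set.ofList b) (fun x => x) false).length) 0 0 [])) x = true
      ↔ (x ∈ a ∧ x ∈ b) := by
    rw [PySem.Set.contains_iff, PySem.Set.mem_ofList, h,
      PySem.List.mem_sorted, PySem.Set.mem_ofList,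
      PySem.List.mem_sorted, PySem.Set.mem_ofList]
  by_cases h1 : x ∈ a <;> by_cases h2 : x ∈ b <;> simp_all

theorem functi_multiple_spec' (a b : List Int) :
    functi_multiple a b = functi_multiple_alt a b := by
  unfold functi_multiple functi_multiple_alt
  rw [minus_loop_eq a b, minus_loop_eq b a, inter_loop_eq a b]
  simp only [List.nil_append, Prod.mk.injEq]
  refine ⟨?_, ?_, ?_, ?_⟩
  · exact List.filter_congr (fun x hx => by rw [contains_common]; simp [hx])
  · exact List.filter_congr (fun x hx => by rw [contains_common]; simp [hx])
  · exact List.filter_congr (fun x hx => by rw [contains_common]; simp [hx])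
  · show b.foldl PySem.Set.add (a.foldl PySem.Set.add PySem.Set.empty)
        = (b.foldl PySem.Set.add []).foldl PySem.Set.add (PySem.Set.ofList a)
    rw [foldl_add_foldl_add]
    rfl

-- ===== VERDICT =====
theorem functi_multiple_spec : Claim_equal_functi_multiple := by
  intro a b _
  exact functi_multiple_spec' a b
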